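-- pv_equiv track=rewrite | github.com/MohaKhalili/MyPy_TinyCodes | 15 - Exam 5/Part 5 (multiplication_table).py | _multiplication_table_sample_q5
-- ===== SOURCE A (Python) =====
-- def _multiplication_table_sample_q5(n):
--     total_list = []
--     for r in range(1, n+1):
--         for c in range(1, n+1):
--             total_list.append(r*c)
--     multiplication_table = []
--     for i in range(0, len(total_list), n):
--         multiplication_table.append(total_list[i:i+n])
--     return multiplication_table
-- ===== SOURCE B (Python) =====
-- def _multiplication_table_sample_q5(n):
--     table = []
--     for r in range(1, n + 1):
--         row = []
--         for c in range(1, n + 1):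
--             row.append(r * c)
--         table.append(row)
--     return table
-- ===== Notes on version B (the rewrite author's own statement) =====
-- stated objective: simpler
-- what changed: B builds each row directly and appends it to the table, eliminating A's two-phase construction (flat n*n list followed by a second reslicing loop with stride n); Pre_ excludes only n = 0, where A raises ValueError.
-- outside the precondition, e.g. on _multiplication_table_sample_q5(0): A raises ValueError, B returns []
import Mathlib
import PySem

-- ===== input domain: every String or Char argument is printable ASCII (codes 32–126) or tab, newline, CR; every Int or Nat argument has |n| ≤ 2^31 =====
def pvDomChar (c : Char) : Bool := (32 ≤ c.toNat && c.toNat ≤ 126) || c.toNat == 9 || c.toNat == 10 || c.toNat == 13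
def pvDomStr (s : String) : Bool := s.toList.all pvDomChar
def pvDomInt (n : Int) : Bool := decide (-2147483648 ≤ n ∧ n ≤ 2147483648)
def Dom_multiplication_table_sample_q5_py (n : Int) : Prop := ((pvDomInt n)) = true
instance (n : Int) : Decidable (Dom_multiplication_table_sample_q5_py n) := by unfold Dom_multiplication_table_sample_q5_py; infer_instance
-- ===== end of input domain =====

-- B builds each row directly and appends it, replacing A's flat-list-then-reslice two-phase construction; for n = 0 A raises ValueError while B returns [].


-- ===== PORT A =====
def multiplication_table_sample_q5_py (n : Int) : List (List Int) :=
  let total_list : List Int :=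
    (PySem.List.pyRange 1 (n+1) 1).foldl (fun acc r =>
      (PySem.List.pyRange 1 (n+1) 1).foldl (fun acc c => acc ++ [r * c]) acc) []
  (PySem.List.pyRange 0 (total_list.length : Int) n).foldl
    (fun acc i => acc ++ [PySem.List.slice total_list (some i) (some (i + n))]) []

-- ===== PORT B =====
def multiplication_table_sample_q5_py_alt (n : Int) : List (List Int) :=
  (PySem.List.pyRange 1 (n+1) 1).foldl (fun table r =>
    table ++ [(PySem.List.pyRange 1 (n+1) 1).foldl (fun row c => row ++ [r * c]) []]) []

-- ===== PRECONDITION & SPEC =====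
-- Pre_ excludes exactly n = 0, where A's reslicing loop calls range(0, 0, 0) and raises ValueError.
def Pre_multiplication_table_sample_q5_py (n : Int) : Prop := n ≠ 0
instance (n : Int) : Decidable (Pre_multiplication_table_sample_q5_py n) := by unfold Pre_multiplication_table_sample_q5_py; infer_instance
def pvWitness_multiplication_table_sample_q5_py : Int := 3

def Spec_multiplication_table_sample_q5_py (n : Int) (out : List (List Int)) : Prop := out = multiplication_table_sample_q5_py_alt n
instance (n : Int) (out : List (List Int)) : Decidable (Spec_multiplication_table_sample_q5_py n out) := by unfold Spec_multiplication_table_sample_q5_py; infer_instance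

-- ===== CLAIM (what is proved, stated in full; the proofs are below) =====
def Claim_equal_multiplication_table_sample_q5_py : Prop := ∀ (n : Int), Dom_multiplication_table_sample_q5_py n → Pre_multiplication_table_sample_q5_py n → Spec_multiplication_table_sample_q5_py n (multiplication_table_sample_q5_py n)

-- ===== LEMMAS AND PROOFS =====

-- B's fold is the nested map over the two ranges.
lemma alt_eq_map (n : Int) :
    multiplication_table_sample_q5_py_alt n =
      (PySem.List.pyRange 1 (n+1) 1).map (fun r => (PySem.List.pyRange 1 (n+1) 1).map (fun c => r * c)) := by
  unfold multiplication_table_sample_q5_py_alt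
  rw [PySem.List.foldl_congr_mem _ _
      (fun table r => table ++ [(PySem.List.pyRange 1 (n+1) 1).map (fun c => r * c)]) _
      (fun acc x _ => by rw [PySem.List.foldl_append_singleton_eq_map]; rfl)]
  rw [PySem.List.foldl_append_singleton_eq_map]; rfl

-- dropping k rows' worth of a flatten of equal-length rows
lemma flatten_drop {m : Nat} : ∀ (k : Nat) (rows : List (List Int)),
    (∀ row ∈ rows, row.length = m) → rows.flatten.drop (k * m) = (rows.drop k).flatten := by
  intro k
  induction k with
  | zero => intro rows _; simp
  | succ k ih =>
    intro rows h
    cases rows with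
    | nil => simp
    | cons row rest =>
      have hr : row.length = m := h row (by simp)
      have hdm : (row ++ rest.flatten).drop m = rest.flatten := by
        rw [← hr]; exact List.drop_left
      calc ((row :: rest).flatten).drop ((k + 1) * m)
          = (((row ++ rest.flatten).drop m).drop (k * m)) := by
            rw [List.flatten_cons, List.drop_drop]; congr 1; ring
        _ = rest.flatten.drop (k * m) := by rw [hdm]
        _ = (rest.drop k).flatten := ih rest (fun r hr' => h r (by simp [hr']))
        _ = ((row :: rest).drop (k + 1)).flatten := by simp

lemma slice_flatten {m : Nat} (rows : List (List Int)) (h : ∀ row ∈ rows, row.length = m)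
    (k : Nat) (hk : k < rows.length) :
    (rows.flatten.drop (k * m)).take m = rows[k] := by
  rw [flatten_drop k rows h, List.drop_eq_getElem_cons hk, List.flatten_cons,
      ← h rows[k] (List.getElem_mem hk), List.take_left]

lemma flatten_length {m : Nat} (rows : List (List Int)) (h : ∀ row ∈ rows, row.length = m) :
    rows.flatten.length = rows.length * m := by
  rw [List.length_flatten]
  induction rows with
  | nil => simp
  | cons row rest ih =>
    simp only [List.map_cons, List.sum_cons, List.length_cons]
    rw [h row (by simp), ih (fun r hr => h r (by simp [hr]))]; ring

-- the reslicing pass of A reconstructs the rows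
lemma reslice {m : Nat} (hm : 0 < m) (rows : List (List Int)) (h : ∀ row ∈ rows, row.length = m) :
    (PySem.List.pyRange 0 (rows.flatten.length : Int) (m : Int)).foldl
      (fun acc i => acc ++ [PySem.List.slice rows.flatten (some i) (some (i + (m : Int)))]) [] = rows := by
  have hlen : rows.flatten.length = rows.length * m := flatten_length rows h
  have hq : (((rows.length * m : Nat) : Int) - 0 + (m : Int) - 1) / (m : Int) = (rows.length : Int) := by
    have h1 : (((rows.length * m : Nat) : Int) - 0 + (m : Int) - 1) = ((m : Int) - 1) + (rows.length : Int) * (m : Int) := by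
      push_cast; ring
    rw [h1, Int.add_mul_ediv_right _ _ (by exact_mod_cast hm.ne')]
    rw [Int.ediv_eq_zero_of_lt (by omega) (by omega)]; ring
  rw [PySem.List.pyRange_of_pos _ _ (by exact_mod_cast hm), hlen]
  rw [PySem.List.foldl_append_singleton_eq_map]
  by_cases hz : rows = []
  · subst hz; simp
  · have hpos : (0 : Int) < ((rows.length * m : Nat) : Int) := by
      have : 0 < rows.length := List.length_pos_of_ne_nil hz
      exact_mod_cast Nat.mul_pos this hm
    rw [if_pos (by omega), hq]
    simp only [List.map_map, List.nil_append]
    apply List.ext_getElem (by simp)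
    intro k h1 h2
    simp only [List.getElem_map, List.getElem_range, Function.comp]
    have hk : k < rows.length := by simpa using h1
    have hcast : (0 : Int) + (m : Int) * (k : Int) = ((k * m : Nat) : Int) := by push_cast; ring
    rw [hcast]
    rw [PySem.List.slice_natCast_add rows.flatten (k * m) m]
    exact slice_flatten rows h k hk

lemma main_pos (n : Int) (hn : 0 < n) :
    multiplication_table_sample_q5_py n = multiplication_table_sample_q5_py_alt n := by
  obtain ⟨m, rfl⟩ : ∃ m : Nat, n = (m : Int) := ⟨n.toNat, (Int.toNat_of_nonneg hn.le).symm⟩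
  have hm : 0 < m := by exact_mod_cast hn
  rw [alt_eq_map]
  unfold multiplication_table_sample_q5_py
  set R := PySem.List.pyRange 1 ((m : Int) + 1) 1 with hR
  have htot : R.foldl (fun acc r => R.foldl (fun acc c => acc ++ [r * c]) acc) [] =
      (R.map (fun r => R.map (fun c => r * c))).flatten := by
    rw [PySem.List.foldl_congr_mem _ _ (fun acc r => acc ++ R.map (fun c => r * c)) _
        (fun acc x _ => PySem.List.foldl_append_singleton_eq_map _ _ _)]
    rw [PySem.List.foldl_append_eq_flatMap, List.flatMap_def]; rfl
  simp only [htot]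
  exact reslice hm _ (by
    intro row hrow
    obtain ⟨r, _, rfl⟩ := List.mem_map.mp hrow
    rw [List.length_map, hR, PySem.List.length_pyRange_one]
    omega)

lemma main_neg (n : Int) (hn : n < 0) :
    multiplication_table_sample_q5_py n = multiplication_table_sample_q5_py_alt n := by
  have hnil : PySem.List.pyRange 1 (n + 1) 1 = [] := PySem.List.pyRange_one_eq_nil (by omega)
  unfold multiplication_table_sample_q5_py multiplication_table_sample_q5_py_alt
  rw [hnil]
  simp only [List.foldl_nil, List.length_nil, Int.natCast_zero]
  rw [PySem.List.pyRange_of_neg 0 0 hn]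
  simp

-- ===== VERDICT (by name: the statement is the Claim_ definition above) =====
theorem multiplication_table_sample_q5_py_spec : Claim_equal_multiplication_table_sample_q5_py := by
  intro n _ hpre
  unfold Spec_multiplication_table_sample_q5_py
  rcases lt_trichotomy n 0 with h | h | h
  · exact main_neg n h
  · exact absurd h hpre
  · exact main_pos n h
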